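-- pv_equiv track=rewrite | github.com/GeekMagicClock/pixel-app-store | python/store/capture_real_thumbnails.py | score_frame
-- ===== SOURCE A (Python) =====
-- def score_frame(pixels):
--     # Prefer frames that are not "startup blank":
--     # 1) more non-black pixels
--     # 2) more color diversity
--     non_black = 0
--     colors = set()
--     for row in pixels:
--         for r, g, b in row:
--             if (r | g | b) != 0:
--                 non_black += 1
--             colors.add((r, g, b))
--     return (non_black * 10) + len(colors)
-- ===== SOURCE B (Python) =====
-- def score_frame(pixels):
--     # Flatten once, tally pixel frequencies, then derive both metrics
--     # from the frequency table (no per-pixel branch).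
--     flat = [px for row in pixels for px in row]
--     counts = {}
--     for px in flat:
--         counts[px] = counts.get(px, 0) + 1
--     return (len(flat) - counts.get((0, 0, 0), 0)) * 10 + len(counts)
-- ===== Notes on version B (the rewrite author's own statement) =====
-- stated objective: alternative
-- what changed: B flattens the frame once and builds a frequency table, then derives non_black by subtracting the (0,0,0) count from the total and diversity as the table's size, replacing A's two running accumulators with an inline bitwise black-check per pixel.
import Mathlib
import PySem

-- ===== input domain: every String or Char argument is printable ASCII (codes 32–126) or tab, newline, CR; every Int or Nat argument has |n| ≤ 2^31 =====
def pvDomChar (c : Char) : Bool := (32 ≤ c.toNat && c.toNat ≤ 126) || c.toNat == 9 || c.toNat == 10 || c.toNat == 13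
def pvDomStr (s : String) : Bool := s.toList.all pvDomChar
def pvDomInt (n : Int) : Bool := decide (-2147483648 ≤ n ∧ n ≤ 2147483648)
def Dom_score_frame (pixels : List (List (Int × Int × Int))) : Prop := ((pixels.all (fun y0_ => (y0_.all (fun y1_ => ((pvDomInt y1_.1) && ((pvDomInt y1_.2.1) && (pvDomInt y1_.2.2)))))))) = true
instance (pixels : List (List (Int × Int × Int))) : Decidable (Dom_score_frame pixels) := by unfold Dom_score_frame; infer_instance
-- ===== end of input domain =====

-- B flattens the frame once and builds a frequency table, deriving both metrics from it,
-- instead of A's two running accumulators with an inline bitwise black-check (objective: alternative).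

-- ===== PORT A =====
def score_frame (pixels : List (List (Int × Int × Int))) : Int :=
  let st := pixels.foldl
    (fun (st : Int × PySem.Set (Int × Int × Int)) row =>
      row.foldl
        (fun (st : Int × PySem.Set (Int × Int × Int)) p =>
          ( if PySem.Int.bor (PySem.Int.bor p.1 p.2.1) p.2.2 ≠ 0 then st.1 + 1 else st.1,
            PySem.Set.add st.2 p )) st)
    (0, PySem.Set.empty)
  st.1 * 10 + (PySem.Set.len st.2)

-- ===== PORT B =====
def score_frame_alt (pixels : List (List (Int × Int × Int))) : Int :=
  let flat := pixels.flatMap (fun row => row)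
  let counts := flat.foldl
    (fun (d : PySem.Dict (Int × Int × Int) Int) px => d.insert px (d.getD px 0 + 1))
    PySem.Dict.empty
  ((flat.length : Int) - counts.getD (0, 0, 0) 0) * 10 + (counts.size : Int)

-- ===== PRECONDITION & SPEC =====
def Spec_score_frame (pixels : List (List (Int × Int × Int))) (out : Int) : Prop := out = score_frame_alt pixels
instance (pixels : List (List (Int × Int × Int))) (out : Int) : Decidable (Spec_score_frame pixels out) := by unfold Spec_score_frame; infer_instance

-- ===== CLAIM (what is proved, stated in full; the proofs are below) =====
def Claim_equal_score_frame : Prop := ∀ (pixels : List (List (Int × Int × Int))), Dom_score_frame pixels → Spec_score_frame pixels (score_frame pixels)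

-- ===== LEMMAS AND PROOFS =====

theorem nat_or_eq_zero (m n : Nat) : m ||| n = 0 ↔ m = 0 ∧ n = 0 := by
  constructor
  · intro h
    refine ⟨?_, ?_⟩ <;> by_contra hm <;>
      obtain ⟨i, hi⟩ := Nat.exists_testBit_of_ne_zero hm <;>
      have h2 := congrArg (Nat.testBit · i) h <;>
      simp [Nat.testBit_or, hi] at h2
  · rintro ⟨rfl, rfl⟩; simp

theorem bor_eq_zero (a b : Int) : PySem.Int.bor a b = 0 ↔ a = 0 ∧ b = 0 := by
  unfold PySem.Int.bor
  split_ifs with h1 h2 h3 <;> try omega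
  rw [Int.natCast_eq_zero, nat_or_eq_zero]
  omega

def pvNonBlack (p : Int × Int × Int) : Bool :=
  decide (PySem.Int.bor (PySem.Int.bor p.1 p.2.1) p.2.2 ≠ 0)

theorem loopA (l : List (Int × Int × Int)) (nb : Int) (s : PySem.Set (Int × Int × Int)) :
    l.foldl
      (fun (st : Int × PySem.Set (Int × Int × Int)) p =>
        ( if PySem.Int.bor (PySem.Int.bor p.1 p.2.1) p.2.2 ≠ 0 then st.1 + 1 else st.1,
          PySem.Set.add st.2 p )) (nb, s)
    = (nb + (l.countP pvNonBlack : Int), l.foldl PySem.Set.add s) := by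
  induction l generalizing nb s with
  | nil => simp
  | cons p t ih =>
    simp only [List.foldl_cons, List.countP_cons, ih, pvNonBlack]
    by_cases h : PySem.Int.bor (PySem.Int.bor p.1 p.2.1) p.2.2 ≠ 0 <;>
      simp [h] <;> ring

theorem countP_nonblack (l : List (Int × Int × Int)) :
    (l.countP pvNonBlack : Int) = (l.length : Int) - (l.count ((0 : Int), (0 : Int), (0 : Int)) : Int) := by
  have hnot : ∀ p : Int × Int × Int, (!pvNonBlack p) = (p == ((0 : Int), (0 : Int), (0 : Int))) := by
    intro p
    obtain ⟨r, g, b⟩ := p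
    by_cases h : PySem.Int.bor (PySem.Int.bor r g) b = 0
    · obtain ⟨hrg, hb⟩ := (bor_eq_zero _ _).1 h
      obtain ⟨hr, hg⟩ := (bor_eq_zero _ _).1 hrg
      subst hr; subst hg; subst hb
      simp [pvNonBlack, h]
    · have hne : ¬ ((r, g, b) = (((0 : Int), (0 : Int), (0 : Int)))) := by
        intro heq; cases heq; exact h (by decide)
      simp only [pvNonBlack]
      simp [h, hne]
  have h1 : l.count ((0 : Int), (0 : Int), (0 : Int)) = l.countP (fun p => !pvNonBlack p) := by
    rw [List.count_eq_countP]
    exact List.countP_congr (fun a _ => by rw [hnot a])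
  have h3 : l.countP (fun a => decide ¬pvNonBlack a = true) = l.countP (fun a => !pvNonBlack a) :=
    List.countP_congr (fun a _ => by simp)
  have h2 := l.length_eq_countP_add_countP pvNonBlack
  omega

-- ===== VERDICT (by name: the statement is the Claim_ definition above) =====
theorem score_frame_spec : Claim_equal_score_frame := by
  intro pixels _
  unfold Spec_score_frame score_frame score_frame_alt
  simp only [PySem.Dict.foldl_insert_getD_add_one_eq_counter, PySem.Dict.getD_counter]
  have hflat : pixels.flatMap (fun row => row) = pixels.flatten := by
    simp [List.flatMap_def]
  rw [hflat]
  rw [← List.foldl_flatten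
        (f := fun (st : Int × PySem.Set (Int × Int × Int)) p =>
          ( if PySem.Int.bor (PySem.Int.bor p.1 p.2.1) p.2.2 ≠ 0 then st.1 + 1 else st.1,
            PySem.Set.add st.2 p ))]
  rw [loopA]
  have hsize : (PySem.Dict.counter (pixels.flatten)).size
      = (pixels.flatten.foldl PySem.Set.add PySem.Set.empty).length := by
    have hk := PySem.Dict.keys_counter (xs := pixels.flatten)
    have : (PySem.Dict.counter (pixels.flatten)).keys.length
        = (PySem.Set.ofList pixels.flatten).length := by rw [hk]
    simpa [PySem.Dict.keys, PySem.Dict.size, PySem.Set.ofList_eq_foldl] using this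
  simp only [PySem.Set.len, hsize, countP_nonblack]
  ring
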